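-- pv_equiv track=rewrite | github.com/MihanEntalpo/agent-safety-kit | agsekit_cli/agents.py | _merge_default_args
-- ===== SOURCE A (Python) =====
-- from typing import Dict, Iterable, List, Optional, Sequence, Set, Tuple, Union
--
-- def _extract_option_name(arg: str) -> Optional[str]:
--     if not arg.startswith("--"):
--         return None
--     trimmed = arg.strip()
--     if not trimmed.startswith("--"):
--         return None
--     for separator in ("=", " "):
--         if separator in trimmed:
--             return trimmed.split(separator, 1)[0]
--     return trimmed
--
-- def _collect_option_names(args: Sequence[str]) -> Set[str]:
--     names: Set[str] = set()
--     for arg in args: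
--         name = _extract_option_name(arg)
--         if name:
--             names.add(name)
--     return names
--
-- def _merge_default_args(default_args: Sequence[str], user_args: Sequence[str]) -> List[str]:
--     if not default_args:
--         return list(user_args)
--
--     user_names = _collect_option_names(user_args)
--     merged: List[str] = []
--     index = 0
--     while index < len(default_args):
--         arg = default_args[index]
--         name = _extract_option_name(arg)
--         if name and name in user_names:
--             has_inline_value = "=" in arg or any(char.isspace() for char in arg)
--             if not has_inline_value and index + 1 < len(default_args):
--                 next_arg = default_args[index + 1]
--                 if not next_arg.startswith("-"):
--                     index += 2
--                     continue
--             index += 1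
--             continue
--         merged.append(arg)
--         index += 1
--     merged.extend(user_args)
--     return merged
-- ===== SOURCE B (Python) =====
-- def _extract_option_name(arg):
--     if not arg.startswith("--"):
--         return None
--     trimmed = arg.strip()
--     if not trimmed.startswith("--"):
--         return None
--     for separator in ("=", " "):
--         if separator in trimmed:
--             return trimmed.split(separator, 1)[0]
--     return trimmed
--
--
-- def _absorbs(prev, tok):
--     # prev (an option token with no inline value) takes tok as its value
--     name = _extract_option_name(prev)
--     return (name is not None and "=" not in prev
--             and not any(c.isspace() for c in prev)
--             and not tok.startswith("-"))
--
--
-- def _merge_default_args(default_args, user_args):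
--     # One windowed pass: each default token is paired with its predecessor; a
--     # token "belongs" to the preceding option iff that option absorbs it, and a
--     # token is kept iff its owner is not an option overridden by the user.
--     if not default_args:
--         return list(user_args)
--     user_names = {n for n in map(_extract_option_name, user_args) if n}
--     prevs = [None] + list(default_args[:-1])
--     merged = []
--     for prev, tok in zip(prevs, default_args):
--         owner = prev if (prev is not None and _absorbs(prev, tok)) else tok
--         name = _extract_option_name(owner)
--         if not (name and name in user_names):
--             merged.append(tok)
--     return merged + list(user_args)
-- ===== Notes on version B (the rewrite author's own statement) =====
-- stated objective: alternative
-- what changed: A's index-jumping while-loop (which decides inside the override branch whether to also skip the following value token) is replaced by a single windowed pass that pairs every default token with its predecessor, assigns each token an 'owner' (the preceding option iff that option absorbs it), and keeps a token iff its owner is not overridden by a user option.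
import Mathlib
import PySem

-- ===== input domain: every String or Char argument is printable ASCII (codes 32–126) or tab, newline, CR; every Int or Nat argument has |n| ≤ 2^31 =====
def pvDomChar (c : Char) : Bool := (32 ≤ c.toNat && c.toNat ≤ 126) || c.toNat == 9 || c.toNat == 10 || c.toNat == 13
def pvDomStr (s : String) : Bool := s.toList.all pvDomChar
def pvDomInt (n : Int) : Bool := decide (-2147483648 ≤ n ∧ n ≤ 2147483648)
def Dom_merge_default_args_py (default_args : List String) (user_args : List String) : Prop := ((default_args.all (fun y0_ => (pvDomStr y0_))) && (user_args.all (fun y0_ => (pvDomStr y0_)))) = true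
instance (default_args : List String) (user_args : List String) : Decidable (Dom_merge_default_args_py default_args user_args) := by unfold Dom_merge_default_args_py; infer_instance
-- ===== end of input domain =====

-- B replaces A's index-jumping skip loop by a predecessor-paired single pass (owner/absorb decomposition); alternative structure, same cost.

-- shared helper: both Pythons contain this very function (_extract_option_name)
def extractOptionName (arg : String) : Option String :=
  if !(PySem.Str.startswith arg "--") then none
  else
    let trimmed := PySem.Str.strip arg
    if !(PySem.Str.startswith trimmed "--") then none
    else if PySem.Str.isIn "=" trimmed then
      some (((PySem.Str.splitMax? trimmed "=" 1).getD []).headD "")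
    else if PySem.Str.isIn " " trimmed then
      some (((PySem.Str.splitMax? trimmed " " 1).getD []).headD "")
    else some trimmed

-- shared helper: the test 'name and name in user_names' appearing in both Pythons
def nameOverridden (users : PySem.Set String) (name : Option String) : Bool :=
  match name with
  | some n => decide (n ≠ "") && PySem.Set.contains users n
  | none => false

-- ===== PORT A =====
def collectOptionNames (args : List String) : PySem.Set String :=
  args.foldl (fun names arg =>
    match extractOptionName arg with
    | some n => if n ≠ "" then PySem.Set.add names n else names
    | none => names) PySem.Set.empty

def mergeLoopA (users : PySem.Set String) : List String → List String
  | [] => []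
  | arg :: rest =>
    if nameOverridden users (extractOptionName arg) then
      let hasInline := PySem.Str.isIn "=" arg || arg.toList.any PySem.Chars.isspace
      if !hasInline then
        match rest with
        | next :: rest2 =>
          if !(PySem.Str.startswith next "-") then mergeLoopA users rest2
          else mergeLoopA users (next :: rest2)
        | [] => mergeLoopA users []
      else mergeLoopA users rest
    else arg :: mergeLoopA users rest

def merge_default_args_py (default_args : List String) (user_args : List String) : List String :=
  if default_args = [] then user_args
  else mergeLoopA (collectOptionNames user_args) default_args ++ user_args

-- ===== PORT B =====
def absorbsB (prev : String) (tok : String) : Bool :=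
  (extractOptionName prev).isSome
    && !(PySem.Str.isIn "=" prev)
    && !(prev.toList.any PySem.Chars.isspace)
    && !(PySem.Str.startswith tok "-")

def userNamesB (user_args : List String) : PySem.Set String :=
  PySem.Set.ofList (user_args.filterMap (fun a =>
    match extractOptionName a with
    | some n => if n ≠ "" then some n else none
    | none => none))

def bStep (users : PySem.Set String) (acc : List String) (pr : Option String × String) : List String :=
  let owner := match pr.1 with
    | some p => if absorbsB p pr.2 then p else pr.2
    | none => pr.2
  if !(nameOverridden users (extractOptionName owner)) then acc ++ [pr.2] else acc

def merge_default_args_py_alt (default_args : List String) (user_args : List String) : List String :=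
  if default_args = [] then user_args
  else
    let users := userNamesB user_args
    let prevs : List (Option String) := none :: default_args.dropLast.map some
    (List.zip prevs default_args).foldl (bStep users) [] ++ user_args

-- ===== PRECONDITION & SPEC =====
def Spec_merge_default_args_py (default_args : List String) (user_args : List String) (out : List String) : Prop := out = merge_default_args_py_alt default_args user_args
instance (default_args : List String) (user_args : List String) (out : List String) : Decidable (Spec_merge_default_args_py default_args user_args out) := by unfold Spec_merge_default_args_py; infer_instance

-- ===== CLAIM (what is proved, stated in full; the proofs are below) =====
def Claim_equal_merge_default_args_py : Prop := ∀ (default_args : List String) (user_args : List String), Dom_merge_default_args_py default_args user_args → Spec_merge_default_args_py default_args user_args (merge_default_args_py default_args user_args)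

-- ===== LEMMAS AND PROOFS =====

theorem startswith_dash_of_startswith_ddash (s : String)
    (h : PySem.Str.startswith s "--" = true) : PySem.Str.startswith s "-" = true := by
  simp only [PySem.Str.startswith_eq] at h ⊢
  rw [PySem.Chars.startswith_iff] at h ⊢
  exact List.IsPrefix.trans ⟨['-'], rfl⟩ h

theorem startswith_dash_of_extract_some (s : String)
    (h : (extractOptionName s).isSome) : PySem.Str.startswith s "-" = true := by
  by_cases hs : PySem.Str.startswith s "--" = true
  · exact startswith_dash_of_startswith_ddash s hs
  · exfalso
    rw [Bool.not_eq_true] at hs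
    unfold extractOptionName at h
    rw [hs] at h
    simp at h

theorem extract_none_of_not_dash (s : String)
    (h : PySem.Str.startswith s "-" = false) : extractOptionName s = none := by
  have hs : PySem.Str.startswith s "--" = false := by
    by_contra hc
    rw [Bool.not_eq_false] at hc
    rw [startswith_dash_of_startswith_ddash s hc] at h
    cases h
  unfold extractOptionName
  rw [hs]
  simp

-- the user-name sets built by the two ports agree on membership
theorem mem_collect (user_args : List String) (x : String) :
    (x ∈ collectOptionNames user_args) ↔
      x ∈ user_args.filterMap (fun a =>
        match extractOptionName a with
        | some n => if n ≠ "" then some n else none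
        | none => none) := by
  unfold collectOptionNames
  suffices h : ∀ (l : List String) (s : PySem.Set String),
      x ∈ l.foldl (fun names arg =>
        match extractOptionName arg with
        | some n => if n ≠ "" then PySem.Set.add names n else names
        | none => names) s ↔ x ∈ s ∨ x ∈ l.filterMap (fun a =>
        match extractOptionName a with
        | some n => if n ≠ "" then some n else none
        | none => none) by
    rw [h]; simp [PySem.Set.empty]
  intro l
  induction l with
  | nil => simp
  | cons a l ih =>
    intro s
    simp only [List.foldl_cons, List.filterMap_cons]
    cases hE : extractOptionName a with
    | none => rw [ih]
    | some n =>
      by_cases hn : n = ""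
      · simp only [hn]; rw [ih]; simp
      · simp only [if_pos hn]
        rw [ih]
        simp only [List.mem_cons, PySem.Set.mem_add]
        tauto

theorem mem_users_eq (user_args : List String) (x : String) :
    x ∈ collectOptionNames user_args ↔ x ∈ userNamesB user_args := by
  rw [mem_collect]
  unfold userNamesB
  rw [PySem.Set.mem_ofList]

theorem nameOverridden_eq (user_args : List String) (name : Option String) :
    nameOverridden (collectOptionNames user_args) name
      = nameOverridden (userNamesB user_args) name := by
  cases name with
  | none => rfl
  | some n => simp [nameOverridden, mem_users_eq]

-- B's zip with the shifted list is a predecessor pairing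
def pairUp (p : Option String) : List String → List (Option String × String)
  | [] => []
  | t :: r => (p, t) :: pairUp (some t) r

theorem zip_eq_pairUp (d : List String) : ∀ p : Option String,
    List.zip (p :: d.dropLast.map some) d = pairUp p d := by
  induction d with
  | nil => intro p; rfl
  | cons t r ih =>
    intro p
    cases r with
    | nil => rfl
    | cons h r2 =>
      simp only [List.dropLast_cons₂, List.map_cons, List.zip_cons_cons, pairUp]
      exact congrArg _ (ih (some t))

-- main invariant: B's predecessor-paired fold computes A's skip loop
theorem foldB_eq_loopA (users : PySem.Set String) :
    ∀ (d : List String) (p : Option String) (acc : List String),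
    (∀ pt h, p = some pt → d.head? = some h → absorbsB pt h = true →
        nameOverridden users (extractOptionName pt) = false) →
    (pairUp p d).foldl (bStep users) acc = acc ++ mergeLoopA users d := by
  intro d
  induction d using mergeLoopA.induct users with
  | case1 => intro p acc _; simp [pairUp, mergeLoopA]
  | case2 arg hOv hasInline hNI next rest2 hNext ih =>
    -- overridden, no inline value, next exists and does not start with '-': A skips two
    intro p acc hInv
    have hIL : hasInline = (PySem.Str.isIn "=" arg || arg.toList.any PySem.Chars.isspace) := rfl
    rw [Bool.not_eq_true', hIL] at hNI
    rcases Bool.or_eq_false_iff.mp hNI with ⟨h1, h2⟩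
    have hN : PySem.Str.startswith next "-" = false := by
      revert hNext; cases PySem.Str.startswith next "-" <;> simp
    have hSome : (extractOptionName arg).isSome := by
      cases hE : extractOptionName arg <;> simp [nameOverridden, hE] at hOv ⊢
    have hdash : PySem.Str.startswith arg "-" = true :=
      startswith_dash_of_extract_some arg hSome
    have hstep1 : bStep users acc (p, arg) = acc := by
      cases p with
      | none => simp [bStep, hOv]
      | some pt =>
        have hab : absorbsB pt arg = false := by
          unfold absorbsB; rw [hdash]; simp
        simp [bStep, hab, hOv]
    have hab2 : absorbsB arg next = true := by
      unfold absorbsB; rw [hSome, h1, h2, hN]; rfl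
    have hstep2 : bStep users acc ((some arg : Option String), next) = acc := by
      simp [bStep, hab2, hOv]
    have hInv2 : ∀ pt h, (some next : Option String) = some pt → rest2.head? = some h →
        absorbsB pt h = true → nameOverridden users (extractOptionName pt) = false := by
      intro pt h hp _ _
      cases hp
      simp [nameOverridden, extract_none_of_not_dash next hN]
    show List.foldl (bStep users) acc
        ((p, arg) :: ((some arg : Option String), next) :: pairUp (some next) rest2)
      = acc ++ mergeLoopA users (arg :: next :: rest2)
    rw [List.foldl_cons, hstep1, List.foldl_cons, hstep2, ih (some next) acc hInv2]
    simp only [mergeLoopA]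
    rw [hOv, hNI, hN]
    simp
  | case3 arg hOv hasInline hNI next rest2 hNext ih =>
    -- overridden, no inline value, next starts with '-': A skips one
    intro p acc hInv
    have hIL : hasInline = (PySem.Str.isIn "=" arg || arg.toList.any PySem.Chars.isspace) := rfl
    rw [Bool.not_eq_true', hIL] at hNI
    have hN : PySem.Str.startswith next "-" = true := by
      revert hNext; cases PySem.Str.startswith next "-" <;> simp
    have hSome : (extractOptionName arg).isSome := by
      cases hE : extractOptionName arg <;> simp [nameOverridden, hE] at hOv ⊢
    have hdash : PySem.Str.startswith arg "-" = true :=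
      startswith_dash_of_extract_some arg hSome
    have hstep1 : bStep users acc (p, arg) = acc := by
      cases p with
      | none => simp [bStep, hOv]
      | some pt =>
        have hab : absorbsB pt arg = false := by
          unfold absorbsB; rw [hdash]; simp
        simp [bStep, hab, hOv]
    have hInv2 : ∀ pt h, (some arg : Option String) = some pt → (next :: rest2).head? = some h →
        absorbsB pt h = true → nameOverridden users (extractOptionName pt) = false := by
      intro pt h hp hh hab
      cases hp
      cases Option.some.inj hh
      unfold absorbsB at hab
      rw [hN] at hab
      simp at hab
    show List.foldl (bStep users) acc
        ((p, arg) :: pairUp (some arg) (next :: rest2))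
      = acc ++ mergeLoopA users (arg :: next :: rest2)
    rw [List.foldl_cons, hstep1, ih (some arg) acc hInv2]
    simp only [mergeLoopA]
    rw [hOv, hNI, hN]
    simp
  | case4 arg hOv hasInline hNI ih =>
    -- overridden, no inline value, no next token: A skips one
    intro p acc hInv
    have hIL : hasInline = (PySem.Str.isIn "=" arg || arg.toList.any PySem.Chars.isspace) := rfl
    rw [Bool.not_eq_true', hIL] at hNI
    have hSome : (extractOptionName arg).isSome := by
      cases hE : extractOptionName arg <;> simp [nameOverridden, hE] at hOv ⊢
    have hdash : PySem.Str.startswith arg "-" = true :=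
      startswith_dash_of_extract_some arg hSome
    have hstep1 : bStep users acc (p, arg) = acc := by
      cases p with
      | none => simp [bStep, hOv]
      | some pt =>
        have hab : absorbsB pt arg = false := by
          unfold absorbsB; rw [hdash]; simp
        simp [bStep, hab, hOv]
    show List.foldl (bStep users) acc ((p, arg) :: pairUp (some arg) [])
      = acc ++ mergeLoopA users [arg]
    rw [List.foldl_cons, hstep1, ih (some arg) acc (by intro pt h hp hh; simp at hh)]
    simp only [mergeLoopA]
    rw [hOv, hNI]
    simp
  | case5 arg rest hOv hasInline hI ih =>
    -- overridden, inline value present: A skips one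
    intro p acc hInv
    have hIL : hasInline = (PySem.Str.isIn "=" arg || arg.toList.any PySem.Chars.isspace) := rfl
    rw [hIL] at hI
    have hIT : (PySem.Str.isIn "=" arg || arg.toList.any PySem.Chars.isspace) = true := by
      revert hI
      cases (PySem.Str.isIn "=" arg || arg.toList.any PySem.Chars.isspace) <;> simp
    have hSome : (extractOptionName arg).isSome := by
      cases hE : extractOptionName arg <;> simp [nameOverridden, hE] at hOv ⊢
    have hdash : PySem.Str.startswith arg "-" = true :=
      startswith_dash_of_extract_some arg hSome
    have hstep1 : bStep users acc (p, arg) = acc := by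
      cases p with
      | none => simp [bStep, hOv]
      | some pt =>
        have hab : absorbsB pt arg = false := by
          unfold absorbsB; rw [hdash]; simp
        simp [bStep, hab, hOv]
    have hInv2 : ∀ pt h, (some arg : Option String) = some pt → rest.head? = some h →
        absorbsB pt h = true → nameOverridden users (extractOptionName pt) = false := by
      intro pt h hp _ hab
      cases hp
      unfold absorbsB at hab
      rcases Bool.or_eq_true_iff.mp hIT with hc | hc <;> rw [hc] at hab <;> simp at hab
    show List.foldl (bStep users) acc ((p, arg) :: pairUp (some arg) rest)
      = acc ++ mergeLoopA users (arg :: rest)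
    rw [List.foldl_cons, hstep1, ih (some arg) acc hInv2]
    cases rest with
    | nil =>
      simp only [mergeLoopA]
      rw [hOv, hIT]
      try simp
    | cons n r2 =>
      simp only [mergeLoopA]
      rw [hOv, hIT]
      try simp
  | case6 arg rest hOv ih =>
    -- not overridden: A keeps the token
    intro p acc hInv
    rw [Bool.not_eq_true] at hOv
    have hstep1 : bStep users acc (p, arg) = acc ++ [arg] := by
      cases p with
      | none => simp [bStep, hOv]
      | some pt =>
        rcases Bool.eq_false_or_eq_true (absorbsB pt arg) with hab | hab
        · have hformer := hInv pt arg rfl rfl hab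
          simp [bStep, hab, hformer]
        · simp [bStep, hab, hOv]
    have hInv2 : ∀ pt h, (some arg : Option String) = some pt → rest.head? = some h →
        absorbsB pt h = true → nameOverridden users (extractOptionName pt) = false := by
      intro pt h hp _ _
      cases hp
      exact hOv
    show List.foldl (bStep users) acc ((p, arg) :: pairUp (some arg) rest)
      = acc ++ mergeLoopA users (arg :: rest)
    rw [List.foldl_cons, hstep1, ih (some arg) (acc ++ [arg]) hInv2]
    cases rest with
    | nil =>
      simp only [mergeLoopA]
      rw [hOv]
      try simp
    | cons n r2 =>
      simp only [mergeLoopA]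
      rw [hOv]
      try simp

theorem loopA_users_congr (u : List String) (d : List String) :
    mergeLoopA (collectOptionNames u) d = mergeLoopA (userNamesB u) d := by
  induction d using mergeLoopA.induct (collectOptionNames u) with
  | case1 => rfl
  | case2 arg hOv hasInline hNI next rest2 hNext ih =>
    have hIL : hasInline = (PySem.Str.isIn "=" arg || arg.toList.any PySem.Chars.isspace) := rfl
    rw [Bool.not_eq_true', hIL] at hNI
    have hN : PySem.Str.startswith next "-" = false := by
      revert hNext; cases PySem.Str.startswith next "-" <;> simp
    simp only [mergeLoopA]
    rw [← nameOverridden_eq u, hOv, hNI, hN]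
    simp [ih]
  | case3 arg hOv hasInline hNI next rest2 hNext ih =>
    have hIL : hasInline = (PySem.Str.isIn "=" arg || arg.toList.any PySem.Chars.isspace) := rfl
    rw [Bool.not_eq_true', hIL] at hNI
    have hN : PySem.Str.startswith next "-" = true := by
      revert hNext; cases PySem.Str.startswith next "-" <;> simp
    simp only [mergeLoopA]
    rw [← nameOverridden_eq u, hOv, hNI, hN]
    simp [ih]
  | case4 arg hOv hasInline hNI ih =>
    have hIL : hasInline = (PySem.Str.isIn "=" arg || arg.toList.any PySem.Chars.isspace) := rfl
    rw [Bool.not_eq_true', hIL] at hNI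
    simp only [mergeLoopA]
    rw [← nameOverridden_eq u, hOv, hNI]
    try simp [ih]
  | case5 arg rest hOv hasInline hI ih =>
    have hIL : hasInline = (PySem.Str.isIn "=" arg || arg.toList.any PySem.Chars.isspace) := rfl
    rw [hIL] at hI
    have hIT : (PySem.Str.isIn "=" arg || arg.toList.any PySem.Chars.isspace) = true := by
      revert hI
      cases (PySem.Str.isIn "=" arg || arg.toList.any PySem.Chars.isspace) <;> simp
    cases rest with
    | nil =>
      simp only [mergeLoopA]
      rw [← nameOverridden_eq u, hOv, hIT]
      try simp [ih]
    | cons n r2 =>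
      simp only [mergeLoopA]
      rw [← nameOverridden_eq u, hOv, hIT]
      try simp [ih]
  | case6 arg rest hOv ih =>
    rw [Bool.not_eq_true] at hOv
    cases rest with
    | nil =>
      simp only [mergeLoopA]
      rw [← nameOverridden_eq u, hOv]
      try simp [ih]
    | cons n r2 =>
      simp only [mergeLoopA]
      rw [← nameOverridden_eq u, hOv]
      try simp [ih]

-- ===== VERDICT (by name: the statement is the Claim_ definition above) =====
theorem merge_default_args_py_spec : Claim_equal_merge_default_args_py := by
  intro d u _
  unfold Spec_merge_default_args_py merge_default_args_py merge_default_args_py_alt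
  by_cases hd : d = []
  · simp [hd]
  · simp only [hd, if_false]
    rw [zip_eq_pairUp d none,
        foldB_eq_loopA (userNamesB u) d none [] (by intro pt h hp; simp at hp)]
    simp only [List.nil_append]
    exact congrArg (· ++ u) (loopA_users_congr u d)
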